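-- pv_equiv track=rewrite | github.com/lindajoy/DSAs | we_try-again/lists/list-questions/max_min_array.py | max_minimum
-- ===== SOURCE A (Python) =====
-- def max_minimum(lst):
--     # Initialize an empty list
--     max_min = []
--     while len(lst):
--         max_min.append(lst[-1])
--         lst.pop(-1)
--         if len(lst)> 0:
--             max_min.append(lst[0])
--             lst.pop(0)
--     return max_min
-- ===== SOURCE B (Python) =====
-- def max_minimum(lst):
--     # Interleave the reversed list with the forward list; the first len(lst)
--     # entries are exactly last, first, second-last, second, ...  O(n) with no pop(0).
--     out = []
--     for x, y in zip(reversed(lst), lst):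
--         out.append(x)
--         out.append(y)
--     return out[:len(lst)]
-- ===== Notes on version B (the rewrite author's own statement) =====
-- stated objective: faster
-- what changed: Replaces the destructive while loop with its O(n) pop(0) shifts by a single zip of the reversed list with the forward list, taking the first len(lst) interleaved elements; B does not mutate its argument.
import Mathlib
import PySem

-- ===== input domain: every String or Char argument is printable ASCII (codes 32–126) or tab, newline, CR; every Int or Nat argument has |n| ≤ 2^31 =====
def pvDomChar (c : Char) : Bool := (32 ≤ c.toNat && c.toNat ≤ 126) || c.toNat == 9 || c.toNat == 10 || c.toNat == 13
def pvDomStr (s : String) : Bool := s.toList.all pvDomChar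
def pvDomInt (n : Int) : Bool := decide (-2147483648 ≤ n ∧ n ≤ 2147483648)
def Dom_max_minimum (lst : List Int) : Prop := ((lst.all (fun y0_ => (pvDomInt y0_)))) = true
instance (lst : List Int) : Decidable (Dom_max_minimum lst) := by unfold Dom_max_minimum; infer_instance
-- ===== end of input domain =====

-- B replaces A's destructive pop(-1)/pop(0) while loop (quadratic from pop(0)) by one
-- O(n) zip of the reversed list with the forward list; equivalence is about the RETURN
-- value only — A empties its argument in place, B leaves it untouched.

-- ===== PORT A =====
-- the while loop of A: take the last element, then (if any remain) the first, repeat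
def goA (l acc : List Int) : List Int :=
  if hl : l = [] then acc
  else
    let acc1 := acc ++ [l.getLast hl]     -- max_min.append(lst[-1]); lst.pop(-1)
    match h : l.dropLast with
    | [] => acc1
    | y :: rest => goA rest (acc1 ++ [y]) -- max_min.append(lst[0]); lst.pop(0)
  termination_by l.length
  decreasing_by
    have hd : l.dropLast.length = l.length - 1 := by simp
    rw [h] at hd; simp at hd
    omega

def max_minimum (lst : List Int) : List Int := goA lst []

-- ===== PORT B =====
def max_minimum_alt (lst : List Int) : List Int :=
  ((lst.reverse.zip lst).foldl (fun acc p => acc ++ [p.1, p.2]) []).take lst.length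

-- ===== PRECONDITION & SPEC =====
def Spec_max_minimum (lst : List Int) (out : List Int) : Prop := out = max_minimum_alt lst
instance (lst : List Int) (out : List Int) : Decidable (Spec_max_minimum lst out) := by unfold Spec_max_minimum; infer_instance

-- ===== CLAIM (what is proved, stated in full; the proofs are below) =====
def Claim_equal_max_minimum : Prop := ∀ (lst : List Int), Dom_max_minimum lst → Spec_max_minimum lst (max_minimum lst)

-- ===== LEMMAS AND PROOFS =====

def flatZip (l : List Int) : List Int :=
  (l.reverse.zip l).flatMap fun p => [p.1, p.2]

lemma foldl_eq_flatZip (l : List Int) (acc : List Int) :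
    (l.reverse.zip l).foldl (fun acc p => acc ++ [p.1, p.2]) acc = acc ++ flatZip l := by
  exact PySem.List.foldl_append_eq_flatMap (fun p => [p.1, p.2]) (l.reverse.zip l) acc

lemma flatZip_cons_last (y : Int) (rest : List Int) (x : Int) :
    flatZip (y :: rest ++ [x]) = x :: y :: (flatZip rest ++ [y, x]) := by
  unfold flatZip
  have hrev : (y :: rest ++ [x]).reverse = x :: (rest.reverse ++ [y]) := by simp
  rw [hrev]
  have hz : (rest.reverse ++ [y]).zip (rest ++ [x]) = rest.reverse.zip rest ++ [(y, x)] := by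
    rw [List.zip_append (by simp)]
    simp [List.zip]
  simp [hz, List.zip_cons_cons]

lemma flatZip_length (l : List Int) : (flatZip l).length = 2 * l.length := by
  simp [flatZip, List.length_flatMap]; ring

lemma goA_eq (l acc : List Int) : goA l acc = acc ++ (flatZip l).take l.length := by
  by_cases hl : l = []
  · subst hl; simp [goA, flatZip]
  · rw [goA, dif_neg hl]
    generalize hx : l.getLast hl = x
    have hsplit : l.dropLast ++ [x] = l := by rw [← hx]; exact List.dropLast_append_getLast hl
    cases h : l.dropLast with
    | nil =>
      have hxl : l = [x] := by rw [← hsplit, h]; simp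
      subst hxl
      simp [flatZip]
    | cons y rest =>
      show goA rest (acc ++ [x] ++ [y]) = acc ++ List.take l.length (flatZip l)
      have hIH := goA_eq rest (acc ++ [x] ++ [y])
      rw [hIH]
      have hl2 : l = y :: rest ++ [x] := by rw [← hsplit, h]
      conv_rhs => rw [hl2, flatZip_cons_last]
      have hlen : (y :: rest ++ [x]).length = rest.length + 1 + 1 := by simp
      rw [hlen]
      simp only [List.take_succ_cons]
      rw [List.take_append_of_le_length (by rw [flatZip_length]; omega)]
      simp
  termination_by l.length
  decreasing_by
    have hd : l.dropLast.length = l.length - 1 := by simp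
    rw [h] at hd; simp at hd
    omega

-- ===== VERDICT (by name: the statement is the Claim_ definition above) =====
theorem max_minimum_spec : Claim_equal_max_minimum := by
  intro lst _
  unfold Spec_max_minimum max_minimum max_minimum_alt
  rw [goA_eq, foldl_eq_flatZip]
  simp
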